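-- pv_equiv track=rewrite | github.com/Aasthaengg/IBMdataset | Python_codes/p02405/s931427279.py | kisuu
-- ===== SOURCE A (Python) =====
-- def kisuu(a):
--     b = []
--     for i in range(a):
--         if i%2==0:
--             b.append("#")
--         else:
--             b.append(".")
--     return(b)
-- ===== SOURCE B (Python) =====
-- def kisuu(a):
--     return (["#", "."] * ((a + 1) // 2))[:a]
-- ===== Notes on version B (the rewrite author's own statement) =====
-- stated objective: idiomatic
-- what changed: Replaces the per-index parity loop with tiling: repeat the unit ['#', '.'] ceil(a/2) times and slice to length a (measured constant-factor speedup from bulk list repetition).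
import Mathlib
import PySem

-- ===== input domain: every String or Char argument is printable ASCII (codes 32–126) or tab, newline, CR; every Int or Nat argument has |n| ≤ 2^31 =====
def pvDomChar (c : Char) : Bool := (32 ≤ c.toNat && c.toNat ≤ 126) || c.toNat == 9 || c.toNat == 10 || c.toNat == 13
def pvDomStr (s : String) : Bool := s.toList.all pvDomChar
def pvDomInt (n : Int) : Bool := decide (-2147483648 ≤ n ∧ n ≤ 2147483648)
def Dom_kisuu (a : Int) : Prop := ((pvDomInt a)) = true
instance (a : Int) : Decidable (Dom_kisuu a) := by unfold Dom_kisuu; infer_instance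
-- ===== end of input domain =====

-- B builds the alternating list by tiling the unit ["#", "."] and slicing to length a,
-- instead of A's per-index parity loop (idiomatic; measured faster by a constant factor).
-- ===== PORT A =====
def kisuu (a : Int) : List String :=
  (PySem.List.pyRange 0 a 1).foldl
    (fun b i => if PySem.Int.mod i 2 = 0 then b ++ ["#"] else b ++ ["."]) []

-- ===== PORT B =====
def kisuu_alt (a : Int) : List String :=
  PySem.List.slice
    ((List.replicate (PySem.Int.floordiv (a + 1) 2).toNat ["#", "."]).flatten)
    none (some a)

-- ===== PRECONDITION & SPEC =====
def Spec_kisuu (a : Int) (out : List String) : Prop := out = kisuu_alt a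
instance (a : Int) (out : List String) : Decidable (Spec_kisuu a out) := by unfold Spec_kisuu; infer_instance

-- ===== CLAIM (what is proved, stated in full; the proofs are below) =====
def Claim_equal_kisuu : Prop := ∀ (a : Int), Dom_kisuu a → Spec_kisuu a (kisuu a)

-- ===== LEMMAS AND PROOFS =====

-- ===== VERDICT (by name: the statement is the Claim_ definition above) =====
-- parity pattern, the common description of both ports
def pvPat (k : Nat) : String := if k % 2 = 0 then "#" else "."

lemma pvFlat (m : Nat) :
    (List.replicate m (["#", "."] : List String)).flatten = (List.range (2 * m)).map pvPat := by
  induction m with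
  | zero => simp
  | succ m ih =>
    have h2 : 2 * (m + 1) = 2 + 2 * m := by ring
    rw [List.replicate_succ, List.flatten_cons, ih, h2, List.range_add, List.map_append]
    simp [pvPat, List.range_succ, Nat.add_mod_left]

lemma pvA (a : Int) : kisuu a = (List.range a.toNat).map pvPat := by
  unfold kisuu
  rw [PySem.List.pyRange_one]
  have : (a - 0).toNat = a.toNat := by omega
  rw [this]
  induction a.toNat with
  | zero => simp
  | succ n ih =>
    rw [List.range_succ, List.map_append, List.foldl_append, ih, List.map_append]
    simp only [List.map_cons, List.map_nil, List.foldl_cons, List.foldl_nil]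
    have hm : PySem.Int.mod (0 + (n : Int)) 2 = ((n % 2 : Nat) : Int) := by
      rw [Int.zero_add]
      exact_mod_cast PySem.Int.mod_natCast n 2
    rw [hm]
    by_cases h : n % 2 = 0
    · simp [h, pvPat]
    · simp [h, pvPat]; omega

theorem kisuu_spec : Claim_equal_kisuu := by
  intro a _
  unfold Spec_kisuu kisuu_alt
  rw [pvA]
  by_cases ha : 0 ≤ a
  · rw [PySem.List.slice_to (b := a) (xs := _) (hb := ha), pvFlat]
    have hfd : PySem.Int.floordiv (a + 1) 2 = (a + 1) / 2 := by
      exact PySem.Int.floordiv_eq_ediv_of_pos (by omega)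
    have hle : a.toNat ≤ 2 * ((PySem.Int.floordiv (a + 1) 2).toNat) := by
      rw [hfd]; omega
    rw [← List.map_take, List.take_range,
      show min a.toNat (2 * (PySem.Int.floordiv (a + 1) 2).toNat) = a.toNat from by omega]
  · have hz : (PySem.Int.floordiv (a + 1) 2).toNat = 0 := by
      have : PySem.Int.floordiv (a + 1) 2 = (a + 1) / 2 := by
        exact PySem.Int.floordiv_eq_ediv_of_pos (by omega)
      rw [this]; omega
    have hn : a.toNat = 0 := by omega
    rw [hz, hn]
    simp [PySem.List.slice]
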